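-- pv_equiv track=rewrite | github.com/gaberani/AlgorithmStudy | 0628/2020-06-28/문자열 압축_제유빈.py | solution
-- ===== SOURCE A (Python) =====
-- def solution(s):
--     ans = s
--     # 자르는 단위 길이
--     for n in range(1, len(s)):
--         i = 0       # 알파벳 인덱스
--         tmp = ''    # 압축 결과물 저장
--         cur, cnt = '', 1   # 단위문자 저장, 단위문자 카운트
--         while i < len(s):
--             # 다음 단위문자와 같으면
--             if s[i:i+n] == s[i+n:i+2*n]:
--                 cnt += 1
--                 cur = s[i:i+n]
--             # 위 조건 해당 안되고 첫 번째 인덱스이면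
--             elif not i:
--                 tmp += s[i:i+n]
--             # 이전에 저장된 값이 있으면 ex. ababab => 3ab
--             elif cur:
--                 tmp += str(cnt) + cur
--                 cur, cnt = '', 1
--             # 모두 해당 안되고 이전에 저장된 값도 없으면
--             else:
--                 tmp += s[i:i+n]
--             i += n
--         # 저장된 압축 결과물이 있고, 초기 스트링이 아니고, 길이가 더 짧으면 저장
--         if tmp and tmp != s and len(tmp) < len(ans):
--             ans = tmp
--
--     return len(ans)
-- ===== SOURCE B (Python) =====
-- def solution(s):
--     L = len(s)
--     best = L
--     for n in range(1, L):
--         m = -(-L // n)          # number of fixed-size pieces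
--         total, k = 0, 0
--         while k < m:
--             # extend the run of equal pieces starting at piece k using the
--             # periodicity test s[j] == s[j+n] -- no substrings are ever built
--             r = 1
--             while (k + r + 1) * n <= L and all(
--                     s[j] == s[j + n] for j in range((k + r - 1) * n, (k + r) * n)):
--                 r += 1
--             total += min(n, L - k * n) + (len(str(r)) if r > 1 else 0)
--             k += r
--         if total < best:
--             best = total
--     return best
-- ===== Notes on version B (the rewrite author's own statement) =====
-- stated objective: alternative
-- what changed: Replaces A's chunk-by-chunk stateful RLE machine (slice comparisons, cur/cnt flush, building each compressed string and comparing its length) with a run-jumping loop: for each unit n it jumps from run start to run start, extending each run with the character-level periodicity test s[j]==s[j+n], and accumulates the length arithmetically (min(n,L-k*n) plus digit count) without ever constructing substrings or compressed strings.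
import Mathlib
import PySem

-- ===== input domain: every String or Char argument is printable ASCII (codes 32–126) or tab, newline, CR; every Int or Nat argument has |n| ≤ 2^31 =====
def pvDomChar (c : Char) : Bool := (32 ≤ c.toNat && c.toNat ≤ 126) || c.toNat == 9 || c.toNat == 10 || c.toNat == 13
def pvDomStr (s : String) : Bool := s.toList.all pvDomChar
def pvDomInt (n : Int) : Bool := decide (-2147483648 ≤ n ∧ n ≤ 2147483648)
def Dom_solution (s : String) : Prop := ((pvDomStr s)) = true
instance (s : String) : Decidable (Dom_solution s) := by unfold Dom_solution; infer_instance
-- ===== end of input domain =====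

-- B replaces A's chunk-by-chunk stateful RLE machine (slice comparisons, cur/cnt flush,
-- building each compressed string) with a run-jumping loop that extends each run by the
-- character-level periodicity test s[j] == s[j+n] and accumulates the length arithmetically
-- (alternative decomposition; no substrings or compressed strings are built; not claimed faster).

-- ===== PORT A =====
-- fuel = s.length bounds the number of while-iterations (each step advances i by n ≥ 1);
-- it only makes the recursion total and is never exhausted on the inputs the claim covers.
def solutionLoop (s : List Char) (n : Int) (fuel : Nat) (i : Int)
    (tmp cur : List Char) (cnt : Int) : List Char :=
  match fuel with
  | 0 => tmp
  | fuel + 1 =>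
    if i < (s.length : Int) then
      if PySem.List.slice s (some i) (some (i + n))
          = PySem.List.slice s (some (i + n)) (some (i + 2 * n)) then
        solutionLoop s n fuel (i + n) tmp (PySem.List.slice s (some i) (some (i + n))) (cnt + 1)
      else if i = 0 then
        solutionLoop s n fuel (i + n) (tmp ++ PySem.List.slice s (some i) (some (i + n))) cur cnt
      else if cur ≠ [] then
        solutionLoop s n fuel (i + n) (tmp ++ (PySem.Int.toStr cnt).toList ++ cur) [] 1
      else
        solutionLoop s n fuel (i + n) (tmp ++ PySem.List.slice s (some i) (some (i + n))) cur cnt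
    else tmp

def solution (s : String) : Int :=
  let cs := s.toList
  let ans := (PySem.List.pyRange 1 (cs.length : Int) 1).foldl (fun ans n =>
    let tmp := solutionLoop cs n cs.length 0 [] [] 1
    if tmp ≠ [] ∧ tmp ≠ cs ∧ tmp.length < ans.length then tmp else ans) cs
  (ans.length : Int)

-- ===== PORT B =====
-- all(s[j] == s[j+n] for j in range(a, b)) — indices are in range whenever the loop guard held
def solAllMatch (cs : List Char) (n a b : Int) : Bool :=
  (PySem.List.pyRange a b 1).all (fun j => PySem.List.pyGet? cs j == PySem.List.pyGet? cs (j + n))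

-- inner while: extend the run count r; fuel = len(s) bounds the iterations (r increases each step)
def solRun (cs : List Char) (L n : Int) : Nat → Int → Int → Int
  | 0, _, r => r
  | fuel + 1, k, r =>
    if (k + r + 1) * n ≤ L ∧ solAllMatch cs n ((k + r - 1) * n) ((k + r) * n) = true then
      solRun cs L n fuel k (r + 1)
    else r

-- outer while over run starts k; fuel = len(s) bounds the iterations (k increases by r ≥ 1)
def solOuter (cs : List Char) (L n m : Int) : Nat → Int → Int → Int
  | 0, _, total => total
  | fuel + 1, k, total =>
    if k < m then
      let r := solRun cs L n cs.length k 1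
      solOuter cs L n m fuel (k + r)
        (total + min n (L - k * n) + (if 1 < r then ((PySem.Int.toStr r).toList.length : Int) else 0))
    else total

def solution_alt (s : String) : Int :=
  let cs := s.toList
  let L : Int := (cs.length : Int)
  (PySem.List.pyRange 1 L 1).foldl (fun best n =>
    let m := -(PySem.Int.floordiv (-L) n)
    let total := solOuter cs L n m cs.length 0 0
    if total < best then total else best) L

-- ===== PRECONDITION & SPEC =====
def Spec_solution (s : String) (out : Int) : Prop := out = solution_alt s
instance (s : String) (out : Int) : Decidable (Spec_solution s out) := by unfold Spec_solution; infer_instance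

-- ===== CLAIM (what is proved, stated in full; the proofs are below) =====
def Claim_equal_solution : Prop := ∀ (s : String), Dom_solution s → Spec_solution s (solution s)

-- ===== LEMMAS AND PROOFS =====

-- the list of n-chunks of s starting at index i (empty once i runs past the end)
def chunksF (s : List Char) (n i : Nat) : List (List Char) :=
  if _h : i < s.length ∧ 0 < n then (s.drop i).take n :: chunksF s n (i + n) else []
  termination_by s.length - i
  decreasing_by omega

-- A's while-loop re-expressed as a recursion over the chunk list
def aChunks : List (List Char) → Bool → List Char → List Char → Int → List Char
  | [], _, tmp, _, _ => tmp
  | c :: rest, first, tmp, cur, cnt =>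
    if c = rest.headD [] then aChunks rest false tmp c (cnt + 1)
    else if first then aChunks rest false (tmp ++ c) cur cnt
    else if cur ≠ [] then aChunks rest false (tmp ++ (PySem.Int.toStr cnt).toList ++ cur) [] 1
    else aChunks rest false (tmp ++ c) cur cnt

-- length of one compressed piece: |chunk| plus the digits of the count when the run repeats
def pieceL (c : List Char) (m : Int) : Int :=
  (c.length : Int) + (if 1 < m then ((PySem.Int.toStr m).toList.length : Int) else 0)

-- compressed length of a chunk list, linearised by runs: m copies of c already seen, rest remains
def rleRun (c : List Char) (m : Int) : List (List Char) → Int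
  | [] => pieceL c m
  | d :: rest => if d = c then rleRun c (m + 1) rest else pieceL c m + rleRun d 1 rest

def rleLen : List (List Char) → Int
  | [] => 0
  | c :: rest => rleRun c 1 rest

-- length of the run of equal consecutive chunks starting at position i
def runL (s : List Char) (n i : Nat) : Nat :=
  if h : i < s.length ∧ 0 < n ∧ (s.drop i).take n = (s.drop (i + n)).take n
  then runL s n (i + n) + 1 else 1
  termination_by s.length - i
  decreasing_by omega

lemma runL_pos (s : List Char) (n i : Nat) : 1 ≤ runL s n i := by
  rw [runL]; split <;> omega

lemma chunksF_nonnil (s : List Char) (n : Nat) :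
    ∀ k i, s.length - i ≤ k → ∀ c ∈ chunksF s n i, c ≠ [] := by
  intro k
  induction k with
  | zero =>
      intro i hi c hc
      rw [chunksF] at hc
      split at hc
      · omega
      · simp at hc
  | succ k ih =>
      intro i hi c hc
      rw [chunksF] at hc
      split at hc
      · rename_i h
        rcases List.mem_cons.mp hc with h1 | h1
        · subst h1
          have hd : (s.drop i).length = s.length - i := List.length_drop ..
          intro hnil
          have := congrArg List.length hnil
          simp [List.length_take, hd] at this
          omega
        · exact ih (i + n) (by omega) c h1
      · simp at hc

lemma bridge1 (s : List Char) (nn : Nat) (hn : 1 ≤ nn) :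
    ∀ (fuel : Nat) (i : Nat) (tmp cur : List Char) (cnt : Int),
      s.length ≤ i + fuel * nn →
      solutionLoop s (nn : Int) fuel (i : Int) tmp cur cnt
        = aChunks (chunksF s nn i) (i == 0) tmp cur cnt := by
  intro fuel
  induction fuel with
  | zero =>
      intro i tmp cur cnt hfe
      rw [chunksF, dif_neg (by omega)]
      rfl
  | succ fuel ih =>
      intro i tmp cur cnt hfe
      have hfe' : s.length ≤ (i + nn) + fuel * nn := by
        have h : (fuel + 1) * nn = fuel * nn + nn := by ring
        omega
      by_cases hi : i < s.length
      · rw [chunksF, dif_pos ⟨hi, by omega⟩]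
        have e1 : PySem.List.slice s (some (i:Int)) (some ((i:Int) + (nn:Int)))
            = (s.drop i).take nn := PySem.List.slice_natCast_add s i nn
        have ecast : ((i:Int) + (nn:Int)) = (((i + nn : Nat)) : Int) := by push_cast; ring
        have e2 : PySem.List.slice s (some ((i:Int) + (nn:Int))) (some ((i:Int) + 2*(nn:Int)))
            = (s.drop (i + nn)).take nn := by
          rw [ecast, show ((i:Int) + 2*(nn:Int)) = (((i + nn : Nat)):Int) + (nn:Int) by push_cast; ring]
          exact PySem.List.slice_natCast_add s (i + nn) nn
        have e3 : (chunksF s nn (i + nn)).headD [] = (s.drop (i + nn)).take nn := by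
          rw [chunksF]
          by_cases h2 : i + nn < s.length
          · rw [dif_pos ⟨h2, by omega⟩]; rfl
          · rw [dif_neg (by omega), List.drop_eq_nil_of_le (by omega)]
            simp
        simp only [solutionLoop]
        rw [if_pos (by exact_mod_cast hi : (i:Int) < (s.length:Int))]
        simp only [aChunks, e1, e2, e3]
        have hb0 : ((i + nn) == 0) = false := by
          have : i + nn ≠ 0 := by omega
          simpa using this
        by_cases hcond : (s.drop i).take nn = (s.drop (i + nn)).take nn
        · rw [if_pos hcond, if_pos hcond,
            ecast, ih (i + nn) tmp ((s.drop i).take nn) (cnt + 1) hfe', hb0]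
        · rw [if_neg hcond, if_neg hcond]
          by_cases hz : i = 0
          · have hzb : (i == 0) = true := by simp [hz]
            rw [if_pos (by exact_mod_cast hz : (i:Int) = 0), if_pos hzb,
              ecast, ih (i + nn) (tmp ++ (s.drop i).take nn) cur cnt hfe', hb0]
          · have hzb : ¬((i == 0) = true) := by simp [hz]
            rw [if_neg (by exact_mod_cast hz : ¬((i:Int) = 0)), if_neg hzb]
            by_cases hcur : cur ≠ []
            · rw [if_pos hcur, if_pos hcur,
                ecast, ih (i + nn) (tmp ++ (PySem.Int.toStr cnt).toList ++ cur) [] 1 hfe', hb0]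
            · rw [if_neg hcur, if_neg hcur,
                ecast, ih (i + nn) (tmp ++ (s.drop i).take nn) cur cnt hfe', hb0]
      · simp only [solutionLoop]
        rw [if_neg (by exact_mod_cast hi : ¬((i:Int) < (s.length:Int))),
          chunksF, dif_neg (by omega)]
        rfl

-- ===== A-side: aChunks computes rleLen =====

lemma rleRun_flush (c : List Char) (q : Int) (rest : List (List Char))
    (h : rest.headD [] ≠ c) : rleRun c q rest = pieceL c q + rleLen rest := by
  cases rest with
  | nil => simp [rleRun, rleLen]
  | cons d r =>
      have hd : d ≠ c := by simpa using h
      simp [rleRun, rleLen, hd]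

lemma invA (rest : List (List Char)) (hne : ∀ x ∈ rest, x ≠ []) :
    (∀ (tmp : List Char) (m : Int) (c : List Char), c ≠ [] → rest.headD [] = c → 1 ≤ m →
        ((aChunks rest false tmp c (m + 1)).length : Int) = (tmp.length : Int) + rleRun c m rest)
    ∧ (∀ (tmp : List Char),
        ((aChunks rest false tmp [] 1).length : Int) = (tmp.length : Int) + rleLen rest) := by
  induction rest with
  | nil =>
      constructor
      · intro tmp m c hc hhead _
        exact absurd hhead.symm hc
      · intro tmp; simp [aChunks, rleLen]
  | cons c0 rest ih =>
      have hne' : ∀ x ∈ rest, x ≠ [] := fun x hx => hne x (List.mem_cons_of_mem _ hx)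
      have hc0 : c0 ≠ [] := hne c0 List.mem_cons_self
      obtain ⟨ih1, ih2⟩ := ih hne'
      constructor
      · intro tmp m c hc hhead hm
        have hcc : c0 = c := by simpa using hhead
        subst hcc
        simp only [aChunks]
        by_cases hb : c0 = rest.headD []
        · rw [if_pos hb, ih1 tmp (m + 1) c0 hc0 hb.symm (by omega)]
          simp [rleRun]
        · rw [if_neg hb]
          simp only [Bool.false_eq_true, if_false]
          rw [if_pos hc0, ih2 (tmp ++ (PySem.Int.toStr (m + 1)).toList ++ c0)]
          have hr : rleRun c0 m (c0 :: rest) = pieceL c0 (m + 1) + rleLen rest := by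
            simp only [rleRun, if_pos]
            exact rleRun_flush c0 (m + 1) rest (fun he => hb he.symm)
          rw [hr]
          simp only [pieceL, if_pos (show (1:Int) < m + 1 by omega), List.length_append]
          push_cast
          ring
      · intro tmp
        simp only [aChunks]
        by_cases hb : c0 = rest.headD []
        · rw [if_pos hb, ih1 tmp 1 c0 hc0 hb.symm le_rfl]
          simp [rleLen]
        · rw [if_neg hb]
          simp only [Bool.false_eq_true, if_false, ne_eq, not_true_eq_false, if_false]
          rw [ih2 (tmp ++ c0)]
          have hr : rleLen (c0 :: rest) = pieceL c0 1 + rleLen rest := by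
            show rleRun c0 1 rest = _
            exact rleRun_flush c0 1 rest (fun he => hb he.symm)
          rw [hr]
          simp only [pieceL, if_neg (by omega : ¬ (1:Int) < 1), List.length_append]
          push_cast
          ring

lemma invA0 (rest : List (List Char)) (hne : ∀ x ∈ rest, x ≠ []) :
    ((aChunks rest true [] [] 1).length : Int) = rleLen rest := by
  cases rest with
  | nil => simp [aChunks, rleLen]
  | cons c0 rest =>
      have hne' : ∀ x ∈ rest, x ≠ [] := fun x hx => hne x (List.mem_cons_of_mem _ hx)
      have hc0 : c0 ≠ [] := hne c0 List.mem_cons_self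
      obtain ⟨ih1, ih2⟩ := invA rest hne'
      simp only [aChunks]
      by_cases hb : c0 = rest.headD []
      · rw [if_pos hb, ih1 [] 1 c0 hc0 hb.symm le_rfl]
        simp [rleLen]
      · rw [if_neg hb]
        simp only [if_true]
        rw [ih2 ([] ++ c0)]
        have hr : rleLen (c0 :: rest) = pieceL c0 1 + rleLen rest := by
          show rleRun c0 1 rest = _
          exact rleRun_flush c0 1 rest (fun he => hb he.symm)
        rw [hr]
        simp only [pieceL, if_neg (by omega : ¬ (1:Int) < 1), List.nil_append]
        ring

lemma perA (s : List Char) (n : Int) (hn : 1 ≤ n) :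
    ((solutionLoop s n s.length 0 [] [] 1).length : Int) = rleLen (chunksF s n.toNat 0) := by
  have hcast : ((n.toNat : Int)) = n := Int.toNat_of_nonneg (by omega)
  have hnn : 1 ≤ n.toNat := by omega
  have h1 := bridge1 s n.toNat hnn s.length 0 [] [] 1
    (by have := Nat.le_mul_of_pos_right s.length (show 0 < n.toNat by omega); omega)
  rw [← hcast]
  simp only [Nat.cast_zero, beq_self_eq_true] at h1
  rw [h1]
  exact invA0 _ (chunksF_nonnil s n.toNat s.length 0 (by omega))

-- ===== B-side: chunk equality ↔ the character-level periodicity test =====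

lemma chunk_eq_iff (s : List Char) (n i : Nat) (hn : 0 < n) (hi : i < s.length) :
    ((s.drop i).take n = (s.drop (i + n)).take n)
      ↔ (i + 2 * n ≤ s.length ∧ ∀ t : Nat, t < n → s[i + t]? = s[i + n + t]?) := by
  constructor
  · intro heq
    have hlen := congrArg List.length heq
    simp only [List.length_take, List.length_drop] at hlen
    have hb : i + 2 * n ≤ s.length := by omega
    refine ⟨hb, fun t ht => ?_⟩
    have := congrArg (fun l => l[t]?) heq
    simp only [List.getElem?_take, List.getElem?_drop, ht, if_pos] at this
    exact this
  · rintro ⟨hb, hall⟩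
    apply List.ext_getElem?
    intro t
    by_cases ht : t < n
    · simp only [List.getElem?_take, List.getElem?_drop, ht, if_pos]
      exact hall t ht
    · simp [ht]

lemma allMatch_iff (cs : List Char) (nn a b : Nat) :
    (solAllMatch cs (nn : Int) ((a : Nat) : Int) ((b : Nat) : Int) = true)
      ↔ ∀ t : Nat, a ≤ t → t < b → cs[t]? = cs[t + nn]? := by
  unfold solAllMatch
  rw [List.all_eq_true]
  constructor
  · intro h t h1 h2
    have hm : ((t : Nat) : Int) ∈ PySem.List.pyRange a b 1 :=
      PySem.List.mem_pyRange_one.mpr ⟨by exact_mod_cast h1, by exact_mod_cast h2⟩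
    have h2 := eq_of_beq (h _ hm)
    have e : ((t : Nat) : Int) + ((nn : Nat) : Int) = (((t + nn : Nat)) : Int) := by push_cast; ring
    rw [e, PySem.List.pyGet?_natCast, PySem.List.pyGet?_natCast] at h2
    exact h2
  · intro h j hj
    obtain ⟨h1, h2⟩ := PySem.List.mem_pyRange_one.mp hj
    have hj0 : 0 ≤ j := le_trans (by exact_mod_cast Nat.zero_le a) h1
    lift j to Nat using hj0 with t ht
    have e : ((t : Nat) : Int) + ((nn : Nat) : Int) = (((t + nn : Nat)) : Int) := by push_cast; ring
    rw [e, PySem.List.pyGet?_natCast, PySem.List.pyGet?_natCast]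
    simp only [beq_iff_eq]
    exact h t (by exact_mod_cast h1) (by exact_mod_cast h2)

-- the inner while computes the run length
lemma solRun_eq (cs : List Char) (nn : Nat) (hn : 1 ≤ nn) :
    ∀ (fuel : Nat) (k r : Nat), 1 ≤ r → (k + r - 1) * nn < cs.length →
      cs.length ≤ (k + r - 1) * nn + fuel * nn →
      solRun cs (cs.length : Int) (nn : Int) fuel (k : Int) (r : Int)
        = ((r - 1 + runL cs nn ((k + r - 1) * nn) : Nat) : Int) := by
  intro fuel
  induction fuel with
  | zero =>
      intro k r hr hi hfe
      omega
  | succ fuel ih =>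
      intro k r hr hi hfe
      have e1 : ((k : Int) + r - 1) * nn = (((k + r - 1) * nn : Nat) : Int) := by
        push_cast [Nat.cast_sub (show 1 ≤ k + r by omega)]; ring
      have e2 : ((k : Int) + r) * nn = ((((k + r - 1) * nn + nn : Nat)) : Int) := by
        push_cast [Nat.cast_sub (show 1 ≤ k + r by omega)]; ring
      have e3 : ((k : Int) + r + 1) * nn = ((((k + r - 1) * nn + 2 * nn : Nat)) : Int) := by
        push_cast [Nat.cast_sub (show 1 ≤ k + r by omega)]; ring
      set i := (k + r - 1) * nn with hidef
      -- the loop guard is equivalent to equality of the adjacent chunks at position i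
      have hguard : (((k : Int) + r + 1) * nn ≤ (cs.length : Int)
            ∧ solAllMatch cs nn (((k : Int) + r - 1) * nn) (((k : Int) + r) * nn) = true)
          ↔ (cs.drop i).take nn = (cs.drop (i + nn)).take nn := by
        rw [e1, e3, chunk_eq_iff cs nn i (by omega) hi]
        have e2' : (((k : Int) + r) * nn) = (((i + nn : Nat)) : Int) := e2
        rw [e2', allMatch_iff cs nn i (i + nn)]
        constructor
        · rintro ⟨ha, hb⟩
          refine ⟨by exact_mod_cast ha, fun t ht => ?_⟩
          have := hb (i + t) (by omega) (by omega)
          rw [show i + t + nn = i + nn + t by omega] at this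
          exact this
        · rintro ⟨ha, hb⟩
          refine ⟨by exact_mod_cast ha, fun t h1 h2 => ?_⟩
          have := hb (t - i) (by omega)
          rw [show i + (t - i) = t by omega, show i + nn + (t - i) = t + nn by omega] at this
          exact this
      simp only [solRun]
      by_cases hc : (cs.drop i).take nn = (cs.drop (i + nn)).take nn
      · rw [if_pos (hguard.mpr hc)]
        have hlen : i + 2 * nn ≤ cs.length := ((chunk_eq_iff cs nn i (by omega) hi).mp hc).1
        have hstep : (k + (r + 1) - 1) * nn = i + nn := by
          rw [show k + (r + 1) - 1 = (k + r - 1) + 1 from by omega, Nat.succ_mul]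
        have hexp : (fuel + 1) * nn = fuel * nn + nn := by ring
        have hih := ih k (r + 1) (by omega) (by rw [hstep]; omega) (by rw [hstep]; omega)
        rw [hstep] at hih
        have hrl : runL cs nn i = runL cs nn (i + nn) + 1 := by
          rw [runL, dif_pos ⟨hi, (show 0 < nn by omega), hc⟩]
        rw [show ((r : Int) + 1) = (((r + 1 : Nat)) : Int) by push_cast; ring]
        rw [hih, hrl]
        congr 1
        omega
      · rw [if_neg (fun h => hc (hguard.mp h))]
        rw [runL, dif_neg (fun h => hc h.2.2)]
        omega
  -- note: ceiling-count bound makes the zero-fuel case vacuous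

-- k < m (the ceiling chunk count) iff chunk k exists
lemma ceil_lt (L nn : Nat) (hn : 1 ≤ nn) (k : Nat) :
    ((k : Int) < -(PySem.Int.floordiv (-(L : Int)) (nn : Int))) ↔ k * nn < L := by
  have h := PySem.Int.le_floordiv_iff_mul_le (a := -(L : Int)) (b := (nn : Int))
    (q := -(k : Int)) (by exact_mod_cast hn)
  have h' : (-(k : Int) ≤ PySem.Int.floordiv (-(L : Int)) (nn : Int)) ↔ (L : Int) ≤ (k : Int) * nn := by
    rw [h]; constructor <;> intro hx <;> nlinarith
  have hcast : ((k * nn : Nat) : Int) = (k : Int) * nn := by push_cast; ring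
  constructor
  · intro hlt
    by_contra hc
    have := h'.mpr (by exact_mod_cast (by omega : (L:Nat) ≤ k * nn))
    omega
  · intro hlt
    have : ¬ (-(k : Int) ≤ PySem.Int.floordiv (-(L : Int)) (nn : Int)) := by
      intro hx
      have := h'.mp hx
      rw [← hcast] at this
      have : L ≤ k * nn := by exact_mod_cast this
      omega
    omega

-- rleRun over the chunk list, expressed with the run length runL
lemma rleRun_chunks (s : List Char) (nn : Nat) (hn : 0 < nn) :
    ∀ (fuel i r : Nat), s.length - i ≤ fuel → i < s.length → 1 ≤ r →
      rleRun ((s.drop i).take nn) ((r : Nat) : Int) (chunksF s nn (i + nn))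
        = pieceL ((s.drop i).take nn) (((r - 1 + runL s nn i : Nat)) : Int)
          + rleLen (chunksF s nn (i + nn * runL s nn i)) := by
  intro fuel
  induction fuel with
  | zero => intro i r hfe hi hr; omega
  | succ fuel ih =>
      intro i r hfe hi hr
      by_cases hc : (s.drop i).take nn = (s.drop (i + nn)).take nn
      · have hlen : i + 2 * nn ≤ s.length := ((chunk_eq_iff s nn i hn hi).mp hc).1
        have hrl : runL s nn i = runL s nn (i + nn) + 1 := by
          rw [runL, dif_pos ⟨hi, hn, hc⟩]
        rw [chunksF, dif_pos ⟨by omega, hn⟩]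
        simp only [rleRun, if_pos hc.symm]
        have e : ((r : Nat) : Int) + 1 = (((r + 1 : Nat)) : Int) := by push_cast; ring
        rw [e, hc]
        have := ih (i + nn) (r + 1) (by omega) (by omega) (by omega)
        rw [this, ← hc, hrl]
        have e2 : r + 1 - 1 + runL s nn (i + nn) = r - 1 + (runL s nn (i + nn) + 1) := by omega
        have e3 : i + nn + nn * runL s nn (i + nn) = i + nn * (runL s nn (i + nn) + 1) := by
          rw [Nat.mul_succ]; omega
        rw [e2, e3]
      · have hrl : runL s nn i = 1 := by
          rw [runL, dif_neg (fun h => hc h.2.2)]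
        rw [hrl]
        simp only [Nat.mul_one]
        have e : r - 1 + 1 = r := by omega
        rw [e]
        by_cases h2 : i + nn < s.length
        · rw [chunksF, dif_pos ⟨h2, hn⟩]
          have hd : (s.drop (i + nn)).take nn ≠ (s.drop i).take nn := fun h => hc h.symm
          simp only [rleRun, if_neg hd]
          rfl
        · rw [chunksF, dif_neg (by omega)]
          simp [rleRun, rleLen]

-- the outer while computes rleLen of the chunk list
lemma solOuter_eq (s : List Char) (nn : Nat) (hn : 1 ≤ nn) :
    ∀ (fuel k : Nat) (total : Int),
      (-(PySem.Int.floordiv (-(s.length : Int)) (nn : Int))).toNat ≤ k + fuel →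
      solOuter s (s.length : Int) (nn : Int) (-(PySem.Int.floordiv (-(s.length : Int)) (nn : Int)))
          fuel (k : Int) total
        = total + rleLen (chunksF s nn (k * nn)) := by
  intro fuel
  induction fuel with
  | zero =>
      intro k total hfe
      have hk : ¬ (k * nn < s.length) := by
        intro hlt
        have := (ceil_lt s.length nn hn k).mpr hlt
        omega
      simp only [solOuter]
      rw [chunksF, dif_neg (by omega)]
      simp [rleLen]
  | succ fuel ih =>
      intro k total hfe
      by_cases hk : k * nn < s.length
      · have hklt : (k : Int) < -(PySem.Int.floordiv (-(s.length : Int)) (nn : Int)) :=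
          (ceil_lt s.length nn hn k).mpr hk
        simp only [solOuter]
        rw [if_pos hklt]
        have hrun := solRun_eq s nn hn s.length k 1 le_rfl
          (by rw [show k + 1 - 1 = k from by omega]; exact hk)
          (by rw [show k + 1 - 1 = k from by omega]
              have := Nat.le_mul_of_pos_right s.length (show 0 < nn by omega); omega)
        rw [show k + 1 - 1 = k from by omega] at hrun
        rw [show ((1 : Nat) : Int) = (1 : Int) from by norm_num] at hrun
        set q := runL s nn (k * nn) with hqdef
        have hq1 : 1 ≤ q := runL_pos s nn (k * nn)
        have hrq : (1 - 1 + q : Nat) = q := by omega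
        rw [hrq] at hrun
        rw [hrun]
        -- the accumulated piece is pieceL of chunk k with count q
        have hmin : min ((nn : Nat) : Int) ((s.length : Int) - (k : Int) * ((nn : Nat) : Int))
            = (((s.drop (k * nn)).take nn).length : Int) := by
          simp only [List.length_take, List.length_drop]
          push_cast [Nat.cast_sub (le_of_lt hk)]
          omega
        have hnext : ((k : Int) + ((q : Nat) : Int)) = (((k + q : Nat)) : Int) := by push_cast; ring
        rw [hnext]
        rw [ih (k + q) _ (by omega)]
        -- right-hand side via rleRun_chunks at position k*nn with r = 1
        have hrhs : rleLen (chunksF s nn (k * nn))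
            = pieceL ((s.drop (k * nn)).take nn) ((q : Nat) : Int)
              + rleLen (chunksF s nn (k * nn + nn * q)) := by
          rw [chunksF, dif_pos ⟨hk, by omega⟩]
          show rleRun ((s.drop (k * nn)).take nn) ((1 : Nat) : Int) (chunksF s nn (k * nn + nn)) = _
          have := rleRun_chunks s nn (by omega) s.length (k * nn) 1 (by omega) hk le_rfl
          rw [this, ← hqdef]
          simp
        rw [hrhs]
        have hidx : (k + q) * nn = k * nn + nn * q := by ring_nf
        rw [hidx]
        simp only [pieceL, hmin]
        ring
      · have hklt : ¬ ((k : Int) < -(PySem.Int.floordiv (-(s.length : Int)) (nn : Int))) :=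
          fun h => hk ((ceil_lt s.length nn hn k).mp h)
        simp only [solOuter]
        rw [if_neg hklt, chunksF, dif_neg (by omega)]
        simp [rleLen]

lemma perB (s : List Char) (n : Int) (hn : 1 ≤ n) :
    solOuter s (s.length : Int) n (-(PySem.Int.floordiv (-(s.length : Int)) n)) s.length 0 0
      = rleLen (chunksF s n.toNat 0) := by
  have hcast : ((n.toNat : Int)) = n := Int.toNat_of_nonneg (by omega)
  have hnn : 1 ≤ n.toNat := by omega
  have hmle : (-(PySem.Int.floordiv (-(s.length : Int)) ((n.toNat : Nat) : Int))).toNat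
      ≤ 0 + s.length := by
    by_contra hc
    have h1 : (s.length : Int) < -(PySem.Int.floordiv (-(s.length : Int)) ((n.toNat : Nat) : Int)) := by
      omega
    have := (ceil_lt s.length n.toNat hnn s.length).mp h1
    have := Nat.le_mul_of_pos_right s.length (show 0 < n.toNat by omega)
    omega
  have h0 := solOuter_eq s n.toNat hnn s.length 0 0 hmle
  rw [hcast] at h0
  simpa using h0

-- positivity: a nonempty chunk list compresses to length ≥ 1
lemma pieceL_pos (c : List Char) (m : Int) (hc : c ≠ []) : 1 ≤ pieceL c m := by
  have h1 : 1 ≤ (c.length : Int) := by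
    have : c.length ≠ 0 := fun h0 => hc (List.eq_nil_of_length_eq_zero h0)
    omega
  unfold pieceL
  split
  · have := Int.natCast_nonneg ((PySem.Int.toStr m).toList.length)
    omega
  · omega

lemma rleRun_pos (rest : List (List Char)) :
    ∀ (c : List Char) (m : Int), c ≠ [] → (∀ x ∈ rest, x ≠ []) → 1 ≤ rleRun c m rest := by
  induction rest with
  | nil => intro c m hc _; exact pieceL_pos c m hc
  | cons d rest ih =>
      intro c m hc hne
      have hd : d ≠ [] := hne d List.mem_cons_self
      have hne' : ∀ x ∈ rest, x ≠ [] := fun x hx => hne x (List.mem_cons_of_mem _ hx)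
      simp only [rleRun]
      split
      · exact ih c (m + 1) hc hne'
      · have h1 := pieceL_pos c m hc
        have h2 := ih d 1 hd hne'
        omega

lemma rleLen_pos (s : List Char) (nn : Nat) (hn : 0 < nn) (hs : 0 < s.length) :
    1 ≤ rleLen (chunksF s nn 0) := by
  have hne := chunksF_nonnil s nn s.length 0 (by omega)
  rw [chunksF, dif_pos ⟨hs, hn⟩] at hne ⊢
  show 1 ≤ rleRun ((s.drop 0).take nn) 1 (chunksF s nn (0 + nn))
  exact rleRun_pos _ _ _ (hne _ List.mem_cons_self)
    (fun x hx => hne x (List.mem_cons_of_mem _ hx))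

-- the two per-n folds agree step by step
lemma outer_fold (s : List Char) :
    ∀ (l : List Int) (ans : List Char) (best : Int), (∀ n ∈ l, 1 ≤ n) →
      (ans.length : Int) = best → ans.length ≤ s.length →
      ((l.foldl (fun ans n =>
          let tmp := solutionLoop s n s.length 0 [] [] 1
          if tmp ≠ [] ∧ tmp ≠ s ∧ tmp.length < ans.length then tmp else ans) ans).length : Int)
        = l.foldl (fun best n =>
            let m := -(PySem.Int.floordiv (-(s.length : Int)) n)
            let total := solOuter s (s.length : Int) n m s.length 0 0
            if total < best then total else best) best := by
  intro l
  induction l with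
  | nil => intro ans best _ h2 _; simpa using h2
  | cons n l ih =>
      intro ans best hl h2 h3
      have hn1 : 1 ≤ n := hl n List.mem_cons_self
      have hrest : ∀ m ∈ l, 1 ≤ m := fun m hm => hl m (List.mem_cons_of_mem _ hm)
      have hA := perA s n hn1
      have hB := perB s n hn1
      simp only [List.foldl_cons]
      rw [hB, ← hA, ← h2]
      by_cases hlt : (solutionLoop s n s.length 0 [] [] 1).length < ans.length
      · have htne : solutionLoop s n s.length 0 [] [] 1 ≠ [] := by
          intro hnil
          have hs : 0 < s.length := by omega
          have hpos := rleLen_pos s n.toNat (by omega) hs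
          rw [← hA, hnil] at hpos
          simp at hpos
        have htns : solutionLoop s n s.length 0 [] [] 1 ≠ s := by
          intro hes
          have : (solutionLoop s n s.length 0 [] [] 1).length = s.length := by rw [hes]
          omega
        rw [if_pos ⟨htne, htns, hlt⟩, if_pos (by exact_mod_cast hlt)]
        exact ih _ _ hrest rfl (by omega)
      · rw [if_neg (fun hcond => hlt hcond.2.2), if_neg (by exact_mod_cast hlt)]
        exact ih ans _ hrest rfl h3

-- ===== VERDICT (by name: the statement is the Claim_ definition above) =====
theorem solution_spec : Claim_equal_solution := by
  intro s _
  unfold Spec_solution solution solution_alt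
  exact outer_fold s.toList (PySem.List.pyRange 1 (s.toList.length : Int) 1) s.toList
    ((s.toList.length : Int))
    (fun n hn => (PySem.List.mem_pyRange_one.mp hn).1) rfl le_rfl
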